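-- pv_equiv track=rewrite | github.com/xnTopAz/ICSFieldID | ast_parser.py | process_buffer
-- ===== SOURCE A (Python) =====
-- def process_buffer(buffer, priority):
-- 	if not buffer:
-- 		return []
--
-- 	addr, field = buffer[0][0], buffer[0][1]
--
-- 	events = [e[2] for e in buffer]
--
-- 	if all(e == 'tmp_write' for e in events):
-- 		return [(addr, field, 'tmp_write')]
--
-- 	constraint_events = set(e for e in events if e == 'constraint')
-- 	result = [(addr, field, 'constraint')] if constraint_events else []
--
-- 	other_events = [e for e in events if e != 'constraint']
-- 	if other_events:
-- 		highest = max(other_events, key=lambda x: priority.get(x, 0))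
-- 		result.append((addr, field, highest))
--
-- 	return result
-- ===== SOURCE B (Python) =====
-- def process_buffer(buffer, priority):
--     if not buffer:
--         return []
--     addr, field = buffer[0][0], buffer[0][1]
--     all_tmp = True
--     has_constraint = False
--     best = None  # (event, priority) of the current best non-constraint event
--     for item in buffer:
--         e = item[2]
--         all_tmp = all_tmp and (e == 'tmp_write')
--         has_constraint = has_constraint or (e == 'constraint')
--         if e != 'constraint':
--             p = priority.get(e, 0)
--             if best is None or p > best[1]:
--                 best = (e, p)
--     if all_tmp:
--         return [(addr, field, 'tmp_write')]
--     result = []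
--     if has_constraint:
--         result.append((addr, field, 'constraint'))
--     if best is not None:
--         result.append((addr, field, best[0]))
--     return result
-- ===== Notes on version B (the rewrite author's own statement) =====
-- stated objective: alternative
-- what changed: A's four separate scans of the buffer (all(), set-of-constraints, filter of others, max with key) are replaced by one fold that maintains an all-tmp flag, a has-constraint flag and the current best non-constraint event (strict-greater update so the first element wins ties).
import Mathlib
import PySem

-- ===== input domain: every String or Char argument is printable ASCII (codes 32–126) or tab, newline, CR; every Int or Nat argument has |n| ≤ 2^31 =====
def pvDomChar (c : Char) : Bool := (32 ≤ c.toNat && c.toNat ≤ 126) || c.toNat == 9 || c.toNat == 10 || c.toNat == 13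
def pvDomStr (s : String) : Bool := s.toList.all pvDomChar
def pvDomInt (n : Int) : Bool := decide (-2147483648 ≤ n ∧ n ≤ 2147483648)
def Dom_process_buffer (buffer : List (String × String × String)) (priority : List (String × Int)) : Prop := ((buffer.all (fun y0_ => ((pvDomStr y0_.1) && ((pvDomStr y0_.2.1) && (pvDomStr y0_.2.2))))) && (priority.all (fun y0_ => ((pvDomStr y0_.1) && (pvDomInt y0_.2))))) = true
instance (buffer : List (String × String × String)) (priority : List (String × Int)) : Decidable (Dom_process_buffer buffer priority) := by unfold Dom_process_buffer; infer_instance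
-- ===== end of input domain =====

-- B replaces A's four separate scans of the buffer by a single fold maintaining
-- (all-tmp flag, constraint flag, current best non-constraint event); same cost class, one pass.

-- priority.get(x, 0) — Python dict lookup with default (shared primitive of both ports)
def prioGet (priority : List (String × Int)) (x : String) : Int :=
  PySem.Dict.getD (PySem.Dict.mk priority) x 0

-- ===== PORT A =====
def process_buffer (buffer : List (String × String × String)) (priority : List (String × Int)) : List (String × String × String) :=
  match buffer with
  | [] => []
  | b0 :: _ =>
    let addr := b0.1
    let field := b0.2.1
    let events := buffer.map (fun e => e.2.2)
    if events.all (fun e => e == "tmp_write") then [(addr, field, "tmp_write")]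
    else
      let constraint_events := PySem.Set.ofList (events.filter (fun e => e == "constraint"))
      let result := if constraint_events = [] then [] else [(addr, field, "constraint")]
      let other_events := events.filter (fun e => e != "constraint")
      match PySem.List.max? other_events (fun x => prioGet priority x) with
      | none => result
      | some highest => result ++ [(addr, field, highest)]

-- ===== PORT B =====
-- one step of B's single pass: state = (all_tmp, has_constraint, best (event, priority))
def pbStep (priority : List (String × Int)) (s : Bool × Bool × Option (String × Int))
    (item : String × String × String) : Bool × Bool × Option (String × Int) :=
  let e := item.2.2
  let all_tmp := s.1 && (e == "tmp_write")
  let has_constraint := s.2.1 || (e == "constraint")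
  if e != "constraint" then
    let p := prioGet priority e
    match s.2.2 with
    | none => (all_tmp, has_constraint, some (e, p))
    | some best => (all_tmp, has_constraint, if p > best.2 then some (e, p) else some best)
  else (all_tmp, has_constraint, s.2.2)

def process_buffer_alt (buffer : List (String × String × String)) (priority : List (String × Int)) : List (String × String × String) :=
  match buffer with
  | [] => []
  | b0 :: _ =>
    let addr := b0.1
    let field := b0.2.1
    let st := buffer.foldl (pbStep priority) (true, false, none)
    if st.1 then [(addr, field, "tmp_write")]
    else
      (if st.2.1 then [(addr, field, "constraint")] else []) ++
      (match st.2.2 with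
       | none => []
       | some best => [(addr, field, best.1)])

-- ===== PRECONDITION & SPEC =====
def Spec_process_buffer (buffer : List (String × String × String)) (priority : List (String × Int)) (out : List (String × String × String)) : Prop := out = process_buffer_alt buffer priority
instance (buffer : List (String × String × String)) (priority : List (String × Int)) (out : List (String × String × String)) : Decidable (Spec_process_buffer buffer priority out) := by unfold Spec_process_buffer; infer_instance

-- ===== CLAIM (what is proved, stated in full; the proofs are below) =====
def Claim_equal_process_buffer : Prop := ∀ (buffer : List (String × String × String)) (priority : List (String × Int)), Dom_process_buffer buffer priority → Spec_process_buffer buffer priority (process_buffer buffer priority)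

-- ===== LEMMAS AND PROOFS =====

-- A's running-max step over plain events (the body of PySem.List.max?)
def maxStep (priority : List (String × Int)) (acc : Option String) (x : String) : Option String :=
  match acc with
  | none => some x
  | some m => if prioGet priority m < prioGet priority x then some x else some m

theorem max?_eq_foldl_maxStep (priority : List (String × Int)) (l : List String) :
    PySem.List.max? l (fun x => prioGet priority x) = l.foldl (maxStep priority) none := by
  simp only [PySem.List.max?]
  exact PySem.List.foldl_congr_mem l _ _ none (fun acc x _ => by cases acc <;> rfl)

-- B's one pass computes the three quantities A computes by separate scans.
theorem fold_char (priority : List (String × Int)) (l : List (String × String × String))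
    (a c : Bool) (b : Option String) :
    l.foldl (pbStep priority) (a, c, b.map (fun x => (x, prioGet priority x))) =
      (a && l.all (fun t => t.2.2 == "tmp_write"),
       c || l.any (fun t => t.2.2 == "constraint"),
       (((l.map (fun t => t.2.2)).filter (fun e => e != "constraint")).foldl (maxStep priority) b).map
         (fun x => (x, prioGet priority x))) := by
  induction l generalizing a c b with
  | nil => simp
  | cons t l ih =>
    by_cases hc : t.2.2 = "constraint"
    · simp only [List.foldl_cons, pbStep, hc, bne_self_eq_false, Bool.false_eq_true, if_false]
      rw [ih]
      simp [hc]
    · have h1 : (t.2.2 == "constraint") = false := by simp [hc]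
      have hne : (t.2.2 != "constraint") = true := by simp [hc]
      have hstep : pbStep priority (a, c, b.map (fun x => (x, prioGet priority x))) t =
          (a && (t.2.2 == "tmp_write"), c || (t.2.2 == "constraint"),
           (maxStep priority b t.2.2).map (fun x => (x, prioGet priority x))) := by
        simp only [pbStep, hne, if_pos]
        cases b with
        | none => rfl
        | some m =>
          simp only [Option.map_some, maxStep]
          by_cases hlt : prioGet priority m < prioGet priority t.2.2
          · simp [hlt]
          · simp [hlt]
      simp only [List.foldl_cons, hstep]
      rw [ih]
      simp [hc, h1, Bool.and_assoc]

theorem filter_beq_nil_iff (l : List String) :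
    (l.filter (fun e => e == "constraint") = []) ↔ (l.any (fun e => e == "constraint") = false) := by
  simp [List.filter_eq_nil_iff, List.any_eq_false]

-- ===== VERDICT (by name: the statement is the Claim_ definition above) =====
theorem process_buffer_spec : Claim_equal_process_buffer := by
  intro buffer priority _
  unfold Spec_process_buffer
  cases buffer with
  | nil => rfl
  | cons b0 rest =>
    unfold process_buffer process_buffer_alt
    have hfold := fold_char priority (b0 :: rest) true false none
    simp only [Option.map_none] at hfold
    rw [hfold]
    simp only [Bool.true_and, Bool.false_or]
    have hallm : ((b0 :: rest).map (fun e => e.2.2)).all (fun e => e == "tmp_write")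
        = (b0 :: rest).all (fun t => t.2.2 == "tmp_write") := by
      rw [List.all_map]; rfl
    have hanym : ((b0 :: rest).map (fun e => e.2.2)).any (fun e => e == "constraint")
        = (b0 :: rest).any (fun t => t.2.2 == "constraint") := by
      rw [List.any_map]; rfl
    by_cases hall : ((b0 :: rest).all (fun t => t.2.2 == "tmp_write")) = true
    · simp only [hallm, hall, if_true]
    · have hall' : ((b0 :: rest).all (fun t => t.2.2 == "tmp_write")) = false := by
        exact Bool.eq_false_iff.mpr hall
      simp only [hallm, hall', Bool.false_eq_true, if_false]
      rw [max?_eq_foldl_maxStep]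
      by_cases hany : ((b0 :: rest).any (fun t => t.2.2 == "constraint")) = true
      · have hne : PySem.Set.ofList (((b0 :: rest).map (fun e => e.2.2)).filter (fun e => e == "constraint")) ≠ [] := by
          intro h
          cases hfe : ((b0 :: rest).map (fun e => e.2.2)).filter (fun e => e == "constraint") with
          | nil =>
            rw [filter_beq_nil_iff, hanym, hany] at hfe
            cases hfe
          | cons x xs =>
            have hx : x ∈ PySem.Set.ofList (x :: xs) := by
              rw [PySem.Set.mem_ofList]; exact List.mem_cons_self
            rw [← hfe, h] at hx
            exact absurd hx (by simp)
        simp only [if_neg hne, hany, if_true]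
        cases hmf : (((b0 :: rest).map (fun t => t.2.2)).filter (fun e => e != "constraint")).foldl (maxStep priority) none with
        | none => simp
        | some h => simp
      · have hanyf : ((b0 :: rest).any (fun t => t.2.2 == "constraint")) = false := by
          exact Bool.eq_false_iff.mpr hany
        have hnil : PySem.Set.ofList (((b0 :: rest).map (fun e => e.2.2)).filter (fun e => e == "constraint")) = [] := by
          rw [(filter_beq_nil_iff _).2 (by rw [hanym]; exact hanyf)]
          rfl
        simp only [hnil, if_pos, hanyf, Bool.false_eq_true, if_false, List.nil_append]
        cases hmf : (((b0 :: rest).map (fun t => t.2.2)).filter (fun e => e != "constraint")).foldl (maxStep priority) none with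
        | none => simp
        | some h => simp
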